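-- pv_equiv track=rewrite | github.com/Abdulhamid97Mousa/mosaic | 3rd_party/mosaic/llm_worker.backup/llm_worker/env_utils.py | check_action_validity
-- ===== SOURCE A (Python) =====
-- from typing import Any, Dict, List, Optional, Tuple, TYPE_CHECKING
--
-- def check_action_validity(action_str: str, valid_actions: List[str]) -> Optional[int]:
--     """Check if action string matches a valid action."""
--     action_str = action_str.strip().lower()
--
--     for i, action in enumerate(valid_actions):
--         if action_str == action.lower():
--             return i
--
--     for i, action in enumerate(valid_actions):
--         if action.lower() in action_str or action_str in action.lower():
--             return i
--
--     return None
-- ===== SOURCE B (Python) =====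
-- def check_action_validity(action_str, valid_actions):
--     """Single pass: exact match returns immediately; first fuzzy match remembered."""
--     action_str = action_str.strip().lower()
--     first_fuzzy = None
--     for i, action in enumerate(valid_actions):
--         low = action.lower()
--         if action_str == low:
--             return i
--         if first_fuzzy is None and (low in action_str or action_str in low):
--             first_fuzzy = i
--     return first_fuzzy
-- ===== Notes on version B (the rewrite author's own statement) =====
-- stated objective: simpler
-- what changed: A's two full enumeration passes (exact-match pass then substring-match pass) are replaced by a single pass that returns on an exact match and records the first fuzzy match in an accumulator returned at the end.
import Mathlib
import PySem

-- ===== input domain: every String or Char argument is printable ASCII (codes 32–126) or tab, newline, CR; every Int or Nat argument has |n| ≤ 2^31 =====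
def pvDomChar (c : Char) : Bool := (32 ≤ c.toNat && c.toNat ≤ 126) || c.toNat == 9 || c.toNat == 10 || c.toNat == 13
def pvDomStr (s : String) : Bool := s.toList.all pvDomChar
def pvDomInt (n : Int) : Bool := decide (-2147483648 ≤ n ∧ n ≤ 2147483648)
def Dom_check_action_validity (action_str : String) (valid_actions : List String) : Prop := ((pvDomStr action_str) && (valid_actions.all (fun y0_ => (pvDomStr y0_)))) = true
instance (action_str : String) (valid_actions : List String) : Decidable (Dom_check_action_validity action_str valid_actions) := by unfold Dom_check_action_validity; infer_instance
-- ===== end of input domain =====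

-- B replaces A's two enumeration passes by one pass that short-circuits on an exact
-- match and remembers the first fuzzy (substring) match; objective: simpler.

-- ===== PORT A =====
-- first loop of A: return i on the first exact (lowercased) match
def pvLoopExact (a : String) : List (Int × String) → Option Int
  | [] => none
  | (i, act) :: rest =>
      if a == PySem.Str.lower act then some i else pvLoopExact a rest

-- second loop of A: return i on the first substring match (either direction)
def pvLoopFuzzy (a : String) : List (Int × String) → Option Int
  | [] => none
  | (i, act) :: rest =>
      if PySem.Str.isIn (PySem.Str.lower act) a || PySem.Str.isIn a (PySem.Str.lower act) then
        some i
      else pvLoopFuzzy a rest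

def check_action_validity (action_str : String) (valid_actions : List String) : Option Int :=
  let a := PySem.Str.lower (PySem.Str.strip action_str)
  let e := PySem.List.enumerate valid_actions 0
  match pvLoopExact a e with
  | some i => some i
  | none => pvLoopFuzzy a e

-- ===== PORT B =====
-- the single loop of B, carrying the first_fuzzy accumulator
def pvLoopB (a : String) : List (Int × String) → Option Int → Option Int
  | [], fuzzy => fuzzy
  | (i, act) :: rest, fuzzy =>
      let low := PySem.Str.lower act
      if a == low then some i
      else if fuzzy.isNone && (PySem.Str.isIn low a || PySem.Str.isIn a low) then
        pvLoopB a rest (some i)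
      else pvLoopB a rest fuzzy

def check_action_validity_alt (action_str : String) (valid_actions : List String) : Option Int :=
  let a := PySem.Str.lower (PySem.Str.strip action_str)
  pvLoopB a (PySem.List.enumerate valid_actions 0) none

-- ===== PRECONDITION & SPEC =====
def Spec_check_action_validity (action_str : String) (valid_actions : List String) (out : Option Int) : Prop := out = check_action_validity_alt action_str valid_actions
instance (action_str : String) (valid_actions : List String) (out : Option Int) : Decidable (Spec_check_action_validity action_str valid_actions out) := by unfold Spec_check_action_validity; infer_instance

-- ===== CLAIM (what is proved, stated in full; the proofs are below) =====
def Claim_equal_check_action_validity : Prop := ∀ (action_str : String) (valid_actions : List String), Dom_check_action_validity action_str valid_actions → Spec_check_action_validity action_str valid_actions (check_action_validity action_str valid_actions)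

-- ===== LEMMAS AND PROOFS =====

-- B's single pass equals: first-exact if any, else the carried fuzzy if set, else first-fuzzy.
theorem pvLoopB_eq (a : String) (l : List (Int × String)) (fuzzy : Option Int) :
    pvLoopB a l fuzzy =
      match pvLoopExact a l with
      | some i => some i
      | none => match fuzzy with
                | some j => some j
                | none => pvLoopFuzzy a l := by
  induction l generalizing fuzzy with
  | nil => cases fuzzy <;> simp [pvLoopB, pvLoopExact, pvLoopFuzzy]
  | cons p rest ih =>
      obtain ⟨i, act⟩ := p
      simp only [pvLoopB, pvLoopExact, pvLoopFuzzy]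
      by_cases hex : a == PySem.Str.lower act
      · simp [hex]
      · by_cases hsub : (PySem.Str.isIn (PySem.Str.lower act) a || PySem.Str.isIn a (PySem.Str.lower act)) = true
        · cases fuzzy <;> simp [hex, hsub, ih] <;>
            (try (rcases hE : pvLoopExact a rest with _ | k <;> simp [hE]))
        · cases fuzzy <;> simp [hex, hsub, ih] <;>
            (try (rcases hE : pvLoopExact a rest with _ | k <;> simp [hE]))

-- ===== VERDICT (by name: the statement is the Claim_ definition above) =====
theorem check_action_validity_spec : Claim_equal_check_action_validity := by
  intro action_str valid_actions _
  unfold Spec_check_action_validity check_action_validity check_action_validity_alt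
  rw [pvLoopB_eq]
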